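-- pv_equiv track=rewrite | github.com/Nyptop/POPI-Project | battleships.py | is_open_sea
-- ===== SOURCE A (Python) =====
-- def is_open_sea(row, column, fleet):
--     """goes through all the ships in the fleet, seeing whether any of them already occupy the coordinates in question"""
--     for ship in fleet:
--         horizontal = ship[2]
--         if horizontal==True:
--             for j in range(ship[1],ship[1]+ship[3]): #scanning along ship (left to right) to ensure coordinates not already occupied
--                 if column==j and row == ship[0]:
--                     return False
--         else:
--             for i in range(ship[0],ship[0]+ship[3]): #scanning along ship (top to bottom) to ensure coordinates not already occupied
--                 if row==i and column == ship[1]: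
--                     return False
--     return True
-- ===== SOURCE B (Python) =====
-- def is_open_sea(row, column, fleet):
--     """O(1) bounds check per ship instead of scanning every cell of the ship."""
--     for r, c, horizontal, length in fleet:
--         if horizontal == True:
--             if row == r and c <= column < c + length:
--                 return False
--         else:
--             if column == c and r <= row < r + length:
--                 return False
--     return True
-- ===== Notes on version B (the rewrite author's own statement) =====
-- stated objective: faster
-- what changed: Replaced the per-cell scan along each ship with a single O(1) interval bounds check per ship.
import Mathlib
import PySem

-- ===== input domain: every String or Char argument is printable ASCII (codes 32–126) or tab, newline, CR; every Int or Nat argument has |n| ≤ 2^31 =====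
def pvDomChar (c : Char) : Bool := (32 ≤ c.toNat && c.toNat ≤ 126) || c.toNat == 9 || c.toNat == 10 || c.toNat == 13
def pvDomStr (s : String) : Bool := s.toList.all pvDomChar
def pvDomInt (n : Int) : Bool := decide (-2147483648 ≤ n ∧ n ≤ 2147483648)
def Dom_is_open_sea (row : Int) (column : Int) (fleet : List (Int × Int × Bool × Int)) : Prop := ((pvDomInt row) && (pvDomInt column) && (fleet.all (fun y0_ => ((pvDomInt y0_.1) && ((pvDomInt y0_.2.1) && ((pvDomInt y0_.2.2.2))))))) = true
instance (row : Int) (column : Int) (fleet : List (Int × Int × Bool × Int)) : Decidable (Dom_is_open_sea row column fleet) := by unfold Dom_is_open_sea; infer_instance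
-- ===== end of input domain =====

-- ===== PORT A =====
-- A scans every cell of each ship, returning False as soon as one matches (row, column);
-- the early return from the inner loop is ported as List.any over the cell range.
def is_open_sea (row : Int) (column : Int) (fleet : List (Int × Int × Bool × Int)) : Bool :=
  match fleet with
  | [] => true
  | ship :: rest =>
    let horizontal := ship.2.2.1
    if horizontal == true then
      if (PySem.List.pyRange ship.2.1 (ship.2.1 + ship.2.2.2) 1).any
           (fun j => column == j && row == ship.1) then false
      else is_open_sea row column rest
    else
      if (PySem.List.pyRange ship.1 (ship.1 + ship.2.2.2) 1).any
           (fun i => row == i && column == ship.2.1) then false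
      else is_open_sea row column rest

-- ===== PORT B =====
-- B does a constant-time interval bounds check per ship (objective: faster, asymptotic).
def is_open_sea_alt (row : Int) (column : Int) (fleet : List (Int × Int × Bool × Int)) : Bool :=
  match fleet with
  | [] => true
  | (r, c, horizontal, length) :: rest =>
    if horizontal == true then
      if row == r && decide (c ≤ column) && decide (column < c + length) then false
      else is_open_sea_alt row column rest
    else
      if column == c && decide (r ≤ row) && decide (row < r + length) then false
      else is_open_sea_alt row column rest

-- ===== PRECONDITION & SPEC =====
def Spec_is_open_sea (row : Int) (column : Int) (fleet : List (Int × Int × Bool × Int)) (out : Bool) : Prop := out = is_open_sea_alt row column fleet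
instance (row : Int) (column : Int) (fleet : List (Int × Int × Bool × Int)) (out : Bool) : Decidable (Spec_is_open_sea row column fleet out) := by unfold Spec_is_open_sea; infer_instance

-- ===== CLAIM (what is proved, stated in full; the proofs are below) =====
def Claim_equal_is_open_sea : Prop := ∀ (row : Int) (column : Int) (fleet : List (Int × Int × Bool × Int)), Dom_is_open_sea row column fleet → Spec_is_open_sea row column fleet (is_open_sea row column fleet)

-- ===== LEMMAS AND PROOFS =====

-- A's scan of the cells of a horizontal ship hits (x in its column range, y = its row)
-- iff B's interval bounds check does.
theorem any_hit_h (x y r a b : Int) :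
    ((PySem.List.pyRange a (a + b) 1).any (fun j => x == j && y == r)) =
      (y == r && decide (a ≤ x) && decide (x < a + b)) := by
  rw [Bool.eq_iff_iff]
  simp only [List.any_eq_true, PySem.List.mem_pyRange_one, Bool.and_eq_true, beq_iff_eq,
    decide_eq_true_eq]
  constructor
  · rintro ⟨j, hj, h3, h4⟩
    subst h3
    exact ⟨⟨h4, hj.1⟩, hj.2⟩
  · rintro ⟨⟨h4, h1⟩, h2⟩
    exact ⟨x, ⟨h1, h2⟩, rfl, h4⟩

-- The same for a vertical ship.
theorem any_hit_v (x y c a b : Int) :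
    ((PySem.List.pyRange a (a + b) 1).any (fun i => y == i && x == c)) =
      (x == c && decide (a ≤ y) && decide (y < a + b)) := by
  rw [Bool.eq_iff_iff]
  simp only [List.any_eq_true, PySem.List.mem_pyRange_one, Bool.and_eq_true, beq_iff_eq,
    decide_eq_true_eq]
  constructor
  · rintro ⟨i, hi, h3, h4⟩
    subst h3
    exact ⟨⟨h4, hi.1⟩, hi.2⟩
  · rintro ⟨⟨h4, h1⟩, h2⟩
    exact ⟨y, ⟨h1, h2⟩, rfl, h4⟩

theorem is_open_sea_eq (row column : Int) (fleet : List (Int × Int × Bool × Int)) :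
    is_open_sea row column fleet = is_open_sea_alt row column fleet := by
  induction fleet with
  | nil => rfl
  | cons ship rest ih =>
    obtain ⟨r, c, h, len⟩ := ship
    cases h with
    | true => simp only [is_open_sea, is_open_sea_alt, any_hit_h, ih]
    | false => simp only [is_open_sea, is_open_sea_alt, any_hit_v, ih]

-- ===== VERDICT (by name: the statement is the Claim_ definition above) =====
theorem is_open_sea_spec : Claim_equal_is_open_sea := by
  intro row column fleet _
  unfold Spec_is_open_sea
  exact is_open_sea_eq row column fleet
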